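-- pv_equiv track=rewrite | github.com/Watermelon-OO/GCEK | codes/dataProcess/NYTData.py | cut_tokens
-- ===== SOURCE A (Python) =====
-- def cut_tokens(fixLen_sen: int, tokens_list: list, leftPos: int, rightPos: int) -> (list, int, int):
--     """cut tokens if sentence length is longer than max length, expand words from two entities
--
--     Args:
--         fixLen_sen: int
--             fix length of sentence
--         tokens_list: list
--             tokens, e.g. words, mask, wpe, tokens...
--             In pcnn+att/cnn+att, it is words, left wpe, right wpe and mask, eg. [words, left_wpe, right_wpe, mask]
--             In bert, is [tokens]
--         leftPos: int
--             position of left entity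
--         rightPos: int
--             position of right entity
--     Returns:
--         new_tokens_list: list[list]
--             tokens include two entities
--         new_leftPos: int
--         new_rightPos: int
--
--     """
--     # get first tokens
--     first_tokens = tokens_list[0]
--     new_tokens_list = []
--     new_leftPos = leftPos
--     new_rightPos = rightPos
--     # longer than FixLen, expand from two entities
--     if len(first_tokens) > fixLen_sen:
--         # sentence between two entities longer than FixLen
--         if rightPos - leftPos + 1 > fixLen_sen:
--             for tokens in tokens_list:
--                 new_tokens_list.append(tokens[leftPos:leftPos + fixLen_sen])
--             new_leftPos = 0
--             new_rightPos = fixLen_sen - 1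
--         # sentence between two entities shorter than FixLen
--         else:
--             # words between two entities
--             for tokens in tokens_list:
--                 new_tokens_list.append(tokens[leftPos:rightPos + 1])
--             # boundaries on both sides
--             before = leftPos
--             after = rightPos + 1
--             new_leftPos = 0
--             new_rightPos = rightPos - leftPos
--
--             left_len = fixLen_sen - len(new_tokens_list[0])
--             # words before left entity
--             backward = int((fixLen_sen - len(new_tokens_list[0])) / 2)
--             # words after left entity
--             forward = left_len - backward
--
--             if leftPos - forward < 0:
--                 before_start = 0
--                 before_end = before
--                 after_start = after
--                 after_end = after + left_len - before
--             elif rightPos + backward >= len(first_tokens):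
--                 before_start = before - (left_len - len(first_tokens[after:]))
--                 before_end = before
--                 after_start = after
--                 after_end = len(first_tokens)
--             else:
--                 before_start = before - forward
--                 before_end = before
--                 after_start = after
--                 after_end = after + backward
--             new_leftPos = new_leftPos + (before_end - before_start)
--             new_rightPos = new_rightPos + (before_end - before_start)
--             # expand words from two entities
--             for i, tokens in enumerate(new_tokens_list):
--                 new_tokens_list[i] = tokens_list[i][before_start:before_end] + \
--                                      tokens + \
--                                      tokens_list[i][after_start:after_end]
--
--     else:
--         for tokens in tokens_list:
--             new_tokens_list.append(tokens)
--     return new_tokens_list, new_leftPos, new_rightPos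
-- ===== SOURCE B (Python) =====
-- def cut_tokens(fixLen_sen: int, tokens_list: list, leftPos: int, rightPos: int) -> (list, int, int):
--     """Single-slice re-implementation: the kept window is one contiguous range [start:end)."""
--     first_tokens = tokens_list[0]
--     if len(first_tokens) <= fixLen_sen:
--         return list(tokens_list), leftPos, rightPos
--     if rightPos - leftPos + 1 > fixLen_sen:
--         return [t[leftPos:leftPos + fixLen_sen] for t in tokens_list], 0, fixLen_sen - 1
--     left_len = fixLen_sen - (rightPos - leftPos + 1)
--     backward = left_len // 2
--     forward = left_len - backward
--     if leftPos - forward < 0: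
--         start, end = 0, rightPos + 1 + left_len - leftPos
--     elif rightPos + backward >= len(first_tokens):
--         start, end = len(first_tokens) - fixLen_sen, len(first_tokens)
--     else:
--         start, end = leftPos - forward, rightPos + 1 + backward
--     return [t[start:end] for t in tokens_list], leftPos - start, rightPos - start
-- ===== Notes on version B (the rewrite author's own statement) =====
-- stated objective: simpler
-- what changed: B observes that in the expand-around-entities branch the kept tokens form one contiguous window, so it computes a single [start:end) range and slices each token list once, replacing A's two-phase build-middle-list-then-prepend/append construction; Pre_ restricts the cutting branch to the natural domain of ordered in-range entity positions (0 <= leftPos <= rightPos < len), outside which A's value is a negative-index/out-of-range slicing artifact, and excludes the empty tokens_list (A raises IndexError).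
-- outside the precondition, e.g. on cut_tokens(0, [[0], [100, 101, 102]], 2, 0): A returns ([[], []], 0, -2), B returns ([[], []], 1, -1); on cut_tokens(2, [], 0, 1): A raises IndexError, B raises IndexError
import Mathlib
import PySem

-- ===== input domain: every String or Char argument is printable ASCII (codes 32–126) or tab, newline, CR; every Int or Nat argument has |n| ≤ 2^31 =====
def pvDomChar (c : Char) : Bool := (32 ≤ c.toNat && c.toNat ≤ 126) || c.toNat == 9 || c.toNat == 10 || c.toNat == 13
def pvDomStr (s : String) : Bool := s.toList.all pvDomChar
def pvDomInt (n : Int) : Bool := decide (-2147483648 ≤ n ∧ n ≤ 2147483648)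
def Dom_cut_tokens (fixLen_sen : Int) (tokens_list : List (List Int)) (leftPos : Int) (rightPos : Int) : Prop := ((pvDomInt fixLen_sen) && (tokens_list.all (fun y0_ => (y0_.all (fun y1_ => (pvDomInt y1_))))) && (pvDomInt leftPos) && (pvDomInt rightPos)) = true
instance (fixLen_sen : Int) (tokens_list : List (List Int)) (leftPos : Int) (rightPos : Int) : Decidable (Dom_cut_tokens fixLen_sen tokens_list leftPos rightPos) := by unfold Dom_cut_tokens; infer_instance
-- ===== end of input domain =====

-- B replaces A's build-middle-then-prepend/append construction by one contiguous [start:end) slice per token list.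
-- Pre_ restricts the cutting branch to ordered in-range entity positions and excludes the empty tokens_list (A raises).
-- ===== PORT A =====
def cut_tokens (fixLen_sen : Int) (tokens_list : List (List Int)) (leftPos : Int) (rightPos : Int) : List (List Int) × Int × Int :=
  -- tokens_list[0]; Pre_ excludes the empty list, where Python raises IndexError
  let first_tokens := tokens_list.headD []
  if (first_tokens.length : Int) > fixLen_sen then
    if rightPos - leftPos + 1 > fixLen_sen then
      (tokens_list.map (fun tokens => PySem.List.slice tokens (some leftPos) (some (leftPos + fixLen_sen))),
       0, fixLen_sen - 1)
    else
      let middles := tokens_list.map (fun tokens => PySem.List.slice tokens (some leftPos) (some (rightPos + 1)))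
      let before := leftPos
      let after := rightPos + 1
      let left_len := fixLen_sen - ((middles.headD []).length : Int)
      -- int((fixLen_sen - len(new_tokens_list[0])) / 2): float division then int() = truncation; exact since |args| ≤ 2^31 < 2^53
      let backward := PySem.Int.truncdiv (fixLen_sen - ((middles.headD []).length : Int)) 2
      let forward := left_len - backward
      let bounds :=
        if leftPos - forward < 0 then
          (0, before, after, after + left_len - before)
        else if rightPos + backward ≥ (first_tokens.length : Int) then
          (before - (left_len - ((PySem.List.slice first_tokens (some after) none).length : Int)), before,
           after, (first_tokens.length : Int))
        else
          (before - forward, before, after, after + backward)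
      let new_leftPos := 0 + (bounds.2.1 - bounds.1)
      let new_rightPos := (rightPos - leftPos) + (bounds.2.1 - bounds.1)
      -- final enumerate loop: new_tokens_list[i] = tokens_list[i][bs:be] + tokens + tokens_list[i][as:ae]
      ((tokens_list.zip middles).map (fun p =>
          PySem.List.slice p.1 (some bounds.1) (some bounds.2.1) ++ p.2 ++
          PySem.List.slice p.1 (some bounds.2.2.1) (some bounds.2.2.2)),
       new_leftPos, new_rightPos)
  else
    (tokens_list, leftPos, rightPos)

-- ===== PORT B =====
def cut_tokens_alt (fixLen_sen : Int) (tokens_list : List (List Int)) (leftPos : Int) (rightPos : Int) : List (List Int) × Int × Int :=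
  let first_tokens := tokens_list.headD []   -- tokens_list[0]; same IndexError on [], excluded by Pre_
  if (first_tokens.length : Int) ≤ fixLen_sen then
    (tokens_list, leftPos, rightPos)
  else if rightPos - leftPos + 1 > fixLen_sen then
    (tokens_list.map (fun t => PySem.List.slice t (some leftPos) (some (leftPos + fixLen_sen))), 0, fixLen_sen - 1)
  else
    let left_len := fixLen_sen - (rightPos - leftPos + 1)
    let backward := PySem.Int.floordiv left_len 2
    let forward := left_len - backward
    let se :=
      if leftPos - forward < 0 then
        ((0 : Int), rightPos + 1 + left_len - leftPos)
      else if rightPos + backward ≥ (first_tokens.length : Int) then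
        ((first_tokens.length : Int) - fixLen_sen, (first_tokens.length : Int))
      else
        (leftPos - forward, rightPos + 1 + backward)
    (tokens_list.map (fun t => PySem.List.slice t (some se.1) (some se.2)),
     leftPos - se.1, rightPos - se.1)

-- ===== PRECONDITION & SPEC =====
-- Pre_ excludes the empty tokens_list (A raises IndexError) and, when the expand-around-entities branch is
-- reached, positions that are not valid ordered indices into the sentence (negative, inverted, past-the-end):
-- there A's value is an accident of Python negative-index/clamped slicing, not a specified behaviour.
def Pre_cut_tokens (fixLen_sen : Int) (tokens_list : List (List Int)) (leftPos : Int) (rightPos : Int) : Prop :=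
  tokens_list ≠ [] ∧
  (((tokens_list.headD []).length : Int) ≤ fixLen_sen ∨
   rightPos - leftPos + 1 > fixLen_sen ∨
   (0 ≤ leftPos ∧ leftPos ≤ rightPos ∧ rightPos < ((tokens_list.headD []).length : Int)))
instance (fixLen_sen : Int) (tokens_list : List (List Int)) (leftPos : Int) (rightPos : Int) : Decidable (Pre_cut_tokens fixLen_sen tokens_list leftPos rightPos) := by unfold Pre_cut_tokens; infer_instance

def pvWitness_cut_tokens : Int × List (List Int) × Int × Int := (2, [[0, 1, 2, 3]], 1, 2)

def Spec_cut_tokens (fixLen_sen : Int) (tokens_list : List (List Int)) (leftPos : Int) (rightPos : Int) (out : List (List Int) × Int × Int) : Prop := out = cut_tokens_alt fixLen_sen tokens_list leftPos rightPos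
instance (fixLen_sen : Int) (tokens_list : List (List Int)) (leftPos : Int) (rightPos : Int) (out : List (List Int) × Int × Int) : Decidable (Spec_cut_tokens fixLen_sen tokens_list leftPos rightPos out) := by unfold Spec_cut_tokens; infer_instance

-- ===== CLAIM (what is proved, stated in full; the proofs are below) =====
def Claim_equal_cut_tokens : Prop := ∀ (fixLen_sen : Int) (tokens_list : List (List Int)) (leftPos : Int) (rightPos : Int), Dom_cut_tokens fixLen_sen tokens_list leftPos rightPos → Pre_cut_tokens fixLen_sen tokens_list leftPos rightPos → Spec_cut_tokens fixLen_sen tokens_list leftPos rightPos (cut_tokens fixLen_sen tokens_list leftPos rightPos)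

-- ===== LEMMAS AND PROOFS =====

-- two adjacent Python slices with ordered nonnegative bounds concatenate to one slice
theorem slice_append_slice (xs : List Int) (a b c : Int)
    (ha : 0 ≤ a) (hab : a ≤ b) (hbc : b ≤ c) :
    PySem.List.slice xs (some a) (some b) ++ PySem.List.slice xs (some b) (some c)
      = PySem.List.slice xs (some a) (some c) := by
  have hb : 0 ≤ b := le_trans ha hab
  have hc : 0 ≤ c := le_trans hb hbc
  rw [PySem.List.slice_toNat xs ha hb, PySem.List.slice_toNat xs hb hc,
      PySem.List.slice_toNat xs ha hc]
  have h1 : c.toNat - a.toNat = (b.toNat - a.toNat) + (c.toNat - b.toNat) := by omega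
  have h2 : (xs.drop a.toNat).drop (b.toNat - a.toNat) = xs.drop b.toNat := by
    rw [List.drop_drop]; congr 1; omega
  rw [h1, List.take_add, h2]

-- ===== VERDICT (by name: the statement is the Claim_ definition above) =====
-- (helper lemmas for the verdict proof)
theorem map_zip_map (xs : List (List Int)) (f : List Int → List Int) (g : List Int × List Int → List Int) :
    ((xs.zip (xs.map f)).map g) = xs.map (fun t => g (t, f t)) := by
  induction xs with
  | nil => rfl
  | cons a tl ih => simp only [List.map_cons, List.zip_cons_cons, ih]

theorem truncdiv_two_nonneg (x : Int) (hx : 0 ≤ x) : PySem.Int.truncdiv x 2 = x / 2 := by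
  simp [PySem.Int.truncdiv, Int.tdiv_eq_ediv, hx]

theorem cut_tokens_spec : Claim_equal_cut_tokens := by
  intro fix tl l r _ hpre
  unfold Spec_cut_tokens
  obtain ⟨hne, hcond⟩ := hpre
  cases tl with
  | nil => exact absurd rfl hne
  | cons t0 rest =>
    simp only [List.headD_cons] at hcond
    by_cases hlen : (t0.length : Int) ≤ fix
    · simp [cut_tokens, cut_tokens_alt, not_lt.mpr hlen, hlen]
    · rw [not_le] at hlen
      by_cases hwide : r - l + 1 > fix
      · simp [cut_tokens, cut_tokens_alt, hlen, hwide, not_le.mpr hlen]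
      · obtain ⟨hl0, hlr, hrn⟩ : 0 ≤ l ∧ l ≤ r ∧ r < (t0.length : Int) := by
          rcases hcond with h | h | h
          · omega
          · exact absurd h hwide
          · exact h
        have hmid : (((PySem.List.slice t0 (some l) (some (r + 1))).length : Int)) = r + 1 - l := by
          rw [PySem.List.slice_toNat t0 hl0 (by omega)]
          simp only [List.length_take, List.length_drop]
          omega
        have htail : (((PySem.List.slice t0 (some (r + 1)) none).length : Int))
            = (t0.length : Int) - (r + 1) := by
          rw [PySem.List.slice_from t0 (by omega : (0:Int) ≤ r + 1)]
          simp only [List.length_drop]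
          omega
        simp only [cut_tokens, cut_tokens_alt, List.headD_cons, List.map_cons,
          if_pos hlen, if_neg hwide, if_neg (not_le.mpr hlen), hmid, htail,
          truncdiv_two_nonneg (fix - (r - l + 1)) (by omega),
          PySem.Int.floordiv_eq_ediv_of_pos (by omega : (0:Int) < 2),
          show fix - (r + 1 - l) = fix - (r - l + 1) from by ring]
        set B := (fix - (r - l + 1)) / 2 with hB
        set F := fix - (r - l + 1) - B with hF
        split_ifs with hc1 hc2
        · -- left edge: window is [0, r+1+left_len-l)
          have key : ∀ t : List Int,
              PySem.List.slice t (some 0) (some l) ++ PySem.List.slice t (some l) (some (r + 1)) ++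
                PySem.List.slice t (some (r + 1)) (some (r + 1 + (fix - (r - l + 1)) - l))
              = PySem.List.slice t (some 0) (some (r + 1 + (fix - (r - l + 1)) - l)) := fun t => by
            rw [slice_append_slice t 0 l (r + 1) le_rfl hl0 (by omega),
                slice_append_slice t 0 (r + 1) (r + 1 + (fix - (r - l + 1)) - l) le_rfl
                  (by omega) (by omega)]
          simp only [Prod.mk.injEq, List.zip_cons_cons, List.map_cons, map_zip_map, key]
          exact ⟨trivial, by omega, by omega⟩
        · -- right edge: window is [n - fix, n)
          have e1 : l - (fix - (r - l + 1) - ((t0.length : Int) - (r + 1)))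
              = (t0.length : Int) - fix := by omega
          rw [e1]
          have key : ∀ t : List Int,
              PySem.List.slice t (some ((t0.length : Int) - fix)) (some l) ++
                PySem.List.slice t (some l) (some (r + 1)) ++
                PySem.List.slice t (some (r + 1)) (some (t0.length : Int))
              = PySem.List.slice t (some ((t0.length : Int) - fix)) (some (t0.length : Int)) :=
            fun t => by
            rw [slice_append_slice t ((t0.length : Int) - fix) l (r + 1) (by omega) (by omega)
                  (by omega),
                slice_append_slice t ((t0.length : Int) - fix) (r + 1) ((t0.length : Int))
                  (by omega) (by omega) (by omega)]
          simp only [Prod.mk.injEq, List.zip_cons_cons, List.map_cons, map_zip_map, key]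
          exact ⟨trivial, by omega, by omega⟩
        · -- middle: window is [l - forward, r + 1 + backward)
          have key : ∀ t : List Int,
              PySem.List.slice t (some (l - F)) (some l) ++
                PySem.List.slice t (some l) (some (r + 1)) ++
                PySem.List.slice t (some (r + 1)) (some (r + 1 + B))
              = PySem.List.slice t (some (l - F)) (some (r + 1 + B)) := fun t => by
            rw [slice_append_slice t (l - F) l (r + 1) (by omega) (by omega) (by omega),
                slice_append_slice t (l - F) (r + 1) (r + 1 + B) (by omega) (by omega) (by omega)]
          simp only [Prod.mk.injEq, List.zip_cons_cons, List.map_cons, map_zip_map, key]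
          exact ⟨trivial, by omega, by omega⟩
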